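-- pv_equiv track=rewrite | github.com/noahhb42/kattis-solutions | jump.py | build_min_d_table
-- ===== SOURCE A (Python) =====
-- from math import gcd
--
-- def egcd(a, b):
--     if b == 0:
--         return (a, 1, 0)
--     g, x1, y1 = egcd(b, a % b)
--     return (g, y1, x1 - (a // b) * y1)
--
-- def inv_mod(a, m):
--     a %= m
--     if m == 1:
--         return 0
--     g, x, _ = egcd(a, m)
--     if g != 1:
--         return None
--     return x % m
--
-- def factorize(n):
--     f = []
--     d = 2
--     while d * d <= n:
--         if n % d == 0:
--             k = 0
--             while n % d == 0:
--                 n //= d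
--                 k += 1
--             f.append((d, k))
--         d += 1 if d == 2 else 2
--     if n > 1:
--         f.append((n, 1))
--     return f
--
-- def divisors_from_factorization(fac):
--     divs = [1]
--     for p, k in fac:
--         cur = []
--         mul = 1
--         for _ in range(k):
--             mul *= p
--             for v in divs:
--                 cur.append(v * mul)
--         divs += cur
--     return divs
--
-- def build_min_d_table(N):
--     M = 2 * N
--     fac = factorize(M)
--     divs = divisors_from_factorization(fac)
--
--     cache = [-1] * M
--
--     def minimal_d_from_B(Bmod):
--         best = None
--         for m in divs:
--             n = M // m
--             g = gcd(m, n)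
--             if Bmod % g != 0:
--                 continue
--             l = M // g
--             m1 = m // g
--             n1 = n // g
--             if n1 == 1:
--                 k = 0
--             else:
--                 inv = inv_mod(m1, n1)
--                 if inv is None:
--                     continue
--                 k = (inv * ((Bmod // g) % n1)) % n1
--             d = (m * k) % l
--             if d == 0:
--                 d = l
--             if best is None or d < best:
--                 best = d
--         return -1 if best is None else best
--
--     dtab = [0] * M
--     for r in range(M):
--         Bmod = (2 * r + 1) % M
--         if cache[Bmod] == -1:
--             cache[Bmod] = minimal_d_from_B(Bmod)
--         dtab[r] = cache[Bmod]
--     return M, dtab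
-- ===== SOURCE B (Python) =====
-- def _strip(n, p):
--     if n % p:
--         return n, 0
--     m, k = _strip(n // p, p)
--     return m, k + 1
--
-- def _factor(n, p):
--     if p * p > n:
--         return [(n, 1)] if n > 1 else []
--     n, k = _strip(n, p)
--     rest = _factor(n, p + 1 if p == 2 else p + 2)
--     return [(p, k)] + rest if k else rest
--
-- def _divisors(fac):
--     if not fac:
--         return [1]
--     p, k = fac[0]
--     rest = _divisors(fac[1:])
--     return [v * p ** j for j in range(k + 1) for v in rest]
--
-- def build_min_d_table(N):
--     M = 2 * N
--     ans = [0] * M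
--     # sieve: for each divisor m and each multiple d of m, d solves every residue
--     # B congruent to d modulo M//m; keep the smallest d per residue
--     for m in _divisors(_factor(M, 2)):
--         n = M // m
--         for d in range(m, M + 1, m):
--             for B in range(d % n, M, n):
--                 if ans[B] == 0 or d < ans[B]:
--                     ans[B] = d
--     dtab = [ans[(2 * r + 1) % M] for r in range(M)]
--     return M, dtab
-- ===== Notes on version B (the rewrite author's own statement) =====
-- stated objective: alternative
-- what changed: A answers each residue with a per-divisor CRT closed form (recursive egcd, modular inverse, minimal-solution formula, plus a per-residue cache over an iteratively built divisor list); B computes the divisor list by a recursive smallest-factor factorization expanded with power-of-p comprehensions, then deletes the entire egcd/inverse/CRT machinery and instead sieves: for every divisor m and every multiple d of m it relaxes ans[B] with d for all residues B congruent to d modulo M//m, and reads the table per residue.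
import Mathlib
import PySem

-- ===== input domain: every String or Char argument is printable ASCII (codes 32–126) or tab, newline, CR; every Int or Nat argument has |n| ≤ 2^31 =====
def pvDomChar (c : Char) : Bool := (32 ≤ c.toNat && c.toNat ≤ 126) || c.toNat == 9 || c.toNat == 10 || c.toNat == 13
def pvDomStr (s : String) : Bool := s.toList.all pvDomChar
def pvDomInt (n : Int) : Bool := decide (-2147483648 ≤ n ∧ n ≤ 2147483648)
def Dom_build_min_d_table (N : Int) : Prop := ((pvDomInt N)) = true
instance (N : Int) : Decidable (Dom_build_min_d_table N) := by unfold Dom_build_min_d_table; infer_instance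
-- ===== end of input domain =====

-- B replaces A's per-residue CRT search (egcd/inv_mod closed form over an iteratively
-- built divisor list) by a recursive smallest-factor divisor generator plus a sieve
-- that fills the whole answer table by min-relaxation (objective: alternative).

-- ===== PORT A =====

-- termination measures for the loops below (named so the recursors stay small)
theorem pvDecMod (a b : Int) (h : ¬ b = 0) : (PySem.Int.mod a b).natAbs < b.natAbs := by
  rcases lt_trichotomy b 0 with hb | hb | hb
  · have h1 := PySem.Int.mod_neg_bounds a hb
    omega
  · exact absurd hb h
  · have h1 := PySem.Int.mod_nonneg a hb
    have h2 := PySem.Int.mod_lt a hb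
    omega

theorem pvDecDiv (n d : Int) (h : PySem.Int.mod n d = 0 ∧ 2 ≤ d ∧ 0 < n) :
    (PySem.Int.floordiv n d).natAbs < n.natAbs := by
  have hd : (0:Int) < d := by omega
  rw [PySem.Int.floordiv_eq_ediv_of_pos hd]
  have h1 : n / d < n := by
    apply Int.ediv_lt_of_lt_mul (by omega)
    nlinarith [h.2.1, h.2.2]
  have h2 : 0 ≤ n / d := Int.ediv_nonneg (by omega) (by omega)
  omega

-- egcd(a, b)
def egcd (a b : Int) : Int × Int × Int :=
  if _h : b = 0 then (a, 1, 0)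
  else
    let t := egcd b (PySem.Int.mod a b)
    (t.1, t.2.2, t.2.1 - PySem.Int.floordiv a b * t.2.2)
termination_by b.natAbs
decreasing_by exact pvDecMod a b _h

-- inv_mod(a, m)
def inv_mod (a m : Int) : Option Int :=
  let a' := PySem.Int.mod a m
  if m = 1 then some 0
  else
    let t := egcd a' m
    if t.1 ≠ 1 then none
    else some (PySem.Int.mod t.2.1 m)

-- inner 'while n % d == 0' of factorize; the '2 ≤ d ∧ 0 < n' conjuncts only totalize
-- this loop (they hold at every call Python's factorize makes)
def facStrip (n d k : Int) : Int × Int :=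
  if h : PySem.Int.mod n d = 0 ∧ 2 ≤ d ∧ 0 < n then
    facStrip (PySem.Int.floordiv n d) d (k + 1)
  else (n, k)
termination_by n.natAbs
decreasing_by exact pvDecDiv n d h

-- needed by facOuter's termination proof below
theorem facStrip_fst_le (n d k : Int) : (facStrip n d k).1 ≤ n ∧ (0 < n → 0 < (facStrip n d k).1) := by
  fun_induction facStrip n d k with
  | case1 n k h ih =>
    have hd : (0:Int) < d := by omega
    have hle : PySem.Int.floordiv n d ≤ n := by
      rw [PySem.Int.floordiv_eq_ediv_of_pos hd]
      exact Int.ediv_le_self d (by omega)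
    have hpos : 0 < PySem.Int.floordiv n d := by
      rw [PySem.Int.floordiv_eq_ediv_of_pos hd]
      have hdvd : d ∣ n := (PySem.Int.mod_eq_zero_iff_dvd n d).1 h.1
      rcases hdvd with ⟨c, hc⟩
      have hc' : n / d = c := by rw [hc]; exact Int.mul_ediv_cancel_left c (by omega)
      nlinarith [h.2.2, hc']
    exact ⟨le_trans ih.1 hle, fun _ => ih.2 hpos⟩
  | case2 n k h => exact ⟨le_refl n, fun h => h⟩

theorem pvDecOuter1 (n d : Int) (h : d * d ≤ n ∧ 2 ≤ d) :
    ((facStrip n d 0).1 + 1 - (d + if d = 2 then 1 else 2)).toNat < (n + 1 - d).toNat := by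
  have hs := facStrip_fst_le n d 0
  have hdn : d ≤ n := by nlinarith [h.1, h.2]
  split <;> omega

theorem pvDecOuter2 (n d : Int) (h : d * d ≤ n ∧ 2 ≤ d) :
    (n + 1 - (d + if d = 2 then 1 else 2)).toNat < (n + 1 - d).toNat := by
  have hdn : d ≤ n := by nlinarith [h.1, h.2]
  split <;> omega

-- outer 'while d * d <= n' of factorize ('2 ≤ d' only totalizes: d starts at 2 and grows)
def facOuter (n d : Int) (f : List (Int × Int)) : Int × List (Int × Int) :=
  if h : d * d ≤ n ∧ 2 ≤ d then
    let next := d + (if d = 2 then 1 else 2)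
    if PySem.Int.mod n d = 0 then
      let s := facStrip n d 0
      facOuter s.1 next (f ++ [(d, s.2)])
    else facOuter n next f
  else (n, f)
termination_by (n + 1 - d).toNat
decreasing_by
  · exact pvDecOuter1 n d h
  · exact pvDecOuter2 n d h

def factorize (n : Int) : List (Int × Int) :=
  let s := facOuter n 2 []
  if s.1 > 1 then s.2 ++ [(s.1, 1)] else s.2

def divisors_from_factorization (fac : List (Int × Int)) : List Int :=
  fac.foldl (fun divs pk =>
    let s := (PySem.List.pyRange 0 pk.2 1).foldl
      (fun (s : List Int × Int) _ =>
        let mul := s.2 * pk.1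
        (divs.foldl (fun cur v => cur ++ [v * mul]) s.1, mul))
      ([], 1)
    divs ++ s.1) [1]

-- loop body of minimal_d_from_B's 'for m in divs' (math.gcd a b = (Int.gcd a b : Int), exact)
def stepA (M Bmod : Int) (best : Option Int) (m : Int) : Option Int :=
  let n := PySem.Int.floordiv M m
  let g : Int := (Int.gcd m n : Nat)
  if PySem.Int.mod Bmod g ≠ 0 then best
  else
    let l := PySem.Int.floordiv M g
    let m1 := PySem.Int.floordiv m g
    let n1 := PySem.Int.floordiv n g
    let k? : Option Int :=
      if n1 = 1 then some 0
      else
        match inv_mod m1 n1 with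
        | none => none                      -- 'continue'
        | some inv => some (PySem.Int.mod (inv * (PySem.Int.mod (PySem.Int.floordiv Bmod g) n1)) n1)
    match k? with
    | none => best
    | some k =>
      let d0 := PySem.Int.mod (m * k) l
      let d := if d0 = 0 then l else d0
      match best with
      | none => some d
      | some b => if d < b then some d else best

def minimal_d_from_B (M : Int) (divs : List Int) (Bmod : Int) : Int :=
  match divs.foldl (stepA M Bmod) none with
  | none => -1
  | some b => b

-- body of the 'for r in range(M)' cache loop
def loopA (M : Int) (divs : List Int) (st : List Int × List Int) (r : Int) : List Int × List Int :=
  let Bmod := PySem.Int.mod (2 * r + 1) M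
  let cache := if PySem.List.pyGetD st.1 Bmod 0 = -1
    then PySem.List.pySetD st.1 Bmod (minimal_d_from_B M divs Bmod)
    else st.1
  (cache, PySem.List.pySetD st.2 r (PySem.List.pyGetD cache Bmod 0))

def build_min_d_table (N : Int) : Int × List Int :=
  let M := 2 * N
  let divs := divisors_from_factorization (factorize M)
  let st := (PySem.List.pyRange 0 M 1).foldl (loopA M divs)
    (PySem.List.pyRepeat [-1] M, PySem.List.pyRepeat [0] M)
  (M, st.2)

-- ===== PORT B =====

-- _strip(n, p): divide p out of n, counting on the way back out
-- ('2 ≤ p ∧ 0 < n' only totalizes; they hold at every call B makes)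
def bStrip (n p : Int) : Int × Int :=
  if h : PySem.Int.mod n p = 0 ∧ 2 ≤ p ∧ 0 < n then
    let s := bStrip (PySem.Int.floordiv n p) p
    (s.1, s.2 + 1)
  else (n, 0)
termination_by n.natAbs
decreasing_by exact pvDecDiv n p h

-- needed by bFactor's termination proof below
theorem bStrip_fst_le (n p : Int) : (bStrip n p).1 ≤ n := by
  fun_induction bStrip n p with
  | case1 n h s ih =>
    have hp : (0:Int) < p := by omega
    have hle : PySem.Int.floordiv n p ≤ n := by
      rw [PySem.Int.floordiv_eq_ediv_of_pos hp]
      exact Int.ediv_le_self p (by omega)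
    exact le_trans ih hle
  | case2 n h => exact le_refl n

theorem pvDecBf (n p : Int) (h : p * p ≤ n ∧ 2 ≤ p) :
    ((bStrip n p).1 + 1 - (p + if p = 2 then 1 else 2)).toNat < (n + 1 - p).toNat := by
  have hs := bStrip_fst_le n p
  have hpn : p ≤ n := by nlinarith [h.1, h.2]
  split <;> omega

-- _factor(n, p): recursive smallest-factor factorization ('2 ≤ p' only totalizes)
def bFactor (n p : Int) : List (Int × Int) :=
  if h : p * p ≤ n ∧ 2 ≤ p then
    let s := bStrip n p
    let rest := bFactor s.1 (p + if p = 2 then 1 else 2)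
    if s.2 ≠ 0 then (p, s.2) :: rest else rest
  else if n > 1 then [(n, 1)] else []
termination_by (n + 1 - p).toNat
decreasing_by exact pvDecBf n p h

-- _divisors(fac): [v * p**j for j in range(k+1) for v in _divisors(fac[1:])]
def bDivs (fac : List (Int × Int)) : List Int :=
  match fac with
  | [] => [1]
  | (p, k) :: rest =>
    (PySem.List.pyRange 0 (k + 1) 1).flatMap (fun j => (bDivs rest).map (fun v => v * p ^ j.toNat))

-- 'if ans[B] == 0 or d < ans[B]: ans[B] = d'
def relaxB (d : Int) (ans : List Int) (B : Int) : List Int :=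
  if PySem.List.pyGetD ans B 0 = 0 ∨ d < PySem.List.pyGetD ans B 0
  then PySem.List.pySetD ans B d else ans

-- one divisor's sieve pass: every multiple d of m relaxes every residue B ≡ d (mod M//m)
def sieveDiv (M : Int) (ans : List Int) (m : Int) : List Int :=
  let n := PySem.Int.floordiv M m
  (PySem.List.pyRange m (M + 1) m).foldl (fun ans d =>
    (PySem.List.pyRange (PySem.Int.mod d n) M n).foldl (relaxB d) ans) ans

def build_min_d_table_alt (N : Int) : Int × List Int :=
  let M := 2 * N
  let ans := (bDivs (bFactor M 2)).foldl (sieveDiv M) (PySem.List.pyRepeat [0] M)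
  (M, (PySem.List.pyRange 0 M 1).map
    (fun r => PySem.List.pyGetD ans (PySem.Int.mod (2 * r + 1) M) 0))

-- ===== PRECONDITION & SPEC =====

def Spec_build_min_d_table (N : Int) (out : Int × List Int) : Prop := out = build_min_d_table_alt N
instance (N : Int) (out : Int × List Int) : Decidable (Spec_build_min_d_table N out) := by unfold Spec_build_min_d_table; infer_instance

-- ===== CLAIM (what is proved, stated in full; the proofs are below) =====
def Claim_equal_build_min_d_table : Prop := ∀ (N : Int), Dom_build_min_d_table N → Spec_build_min_d_table N (build_min_d_table N)

-- ===== LEMMAS AND PROOFS =====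

-- d is a jump solution for divisor m of M at residue B
def solD (M B m d : Int) : Prop := m ∣ d ∧ (M / m) ∣ (d - B)

-- v is the least d ≥ 1 that is a solution for some divisor in divs (and v ≤ M)
def IsAns (M : Int) (divs : List Int) (B v : Int) : Prop :=
  1 ≤ v ∧ v ≤ M ∧ (∃ m ∈ divs, solD M B m v) ∧
    ∀ d, 1 ≤ d → (∃ m ∈ divs, solD M B m d) → v ≤ d

theorem IsAns_unique {M : Int} {divs : List Int} {B v w : Int}
    (hv : IsAns M divs B v) (hw : IsAns M divs B w) : v = w := by
  obtain ⟨hv1, _, hv3, hv4⟩ := hv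
  obtain ⟨hw1, _, hw3, hw4⟩ := hw
  exact le_antisymm (hv4 w hw1 hw3) (hw4 v hv1 hv3)

theorem IsAns_congr {M B v : Int} {d1 d2 : List Int}
    (h : ∀ x, x ∈ d1 ↔ x ∈ d2) (hv : IsAns M d1 B v) : IsAns M d2 B v := by
  obtain ⟨h1, h2, ⟨m, hm, hs⟩, h4⟩ := hv
  exact ⟨h1, h2, ⟨m, (h m).1 hm, hs⟩,
    fun d hd ⟨m', hm', hs'⟩ => h4 d hd ⟨m', (h m').2 hm', hs'⟩⟩

-- ---- egcd / inv_mod ----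

theorem egcd_spec (a b : Int) (ha : 0 ≤ a) (hb : 0 ≤ b) :
    (egcd a b).1 = (Int.gcd a b : Nat) ∧
      a * (egcd a b).2.1 + b * (egcd a b).2.2 = (egcd a b).1 := by
  induction a, b using egcd.induct with
  | case1 a =>
    rw [egcd]
    simp [Int.gcd_zero_right, Int.natAbs_of_nonneg ha]
  | case2 a b h ih =>
    have hbpos : 0 < b := by omega
    have hmod0 : 0 ≤ PySem.Int.mod a b := PySem.Int.mod_nonneg a hbpos
    have ih' := ih hb hmod0
    have hme : PySem.Int.mod a b = a % b := PySem.Int.mod_eq_emod_of_pos hbpos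
    have hfe : PySem.Int.floordiv a b = a / b := PySem.Int.floordiv_eq_ediv_of_pos hbpos
    have hgcd : Int.gcd b (PySem.Int.mod a b) = Int.gcd a b := by
      rw [hme, Int.gcd_comm b (a % b), Int.gcd_emod]
    rw [egcd]
    simp only [h, dite_false, dif_neg]
    refine ⟨by rw [← hgcd]; exact ih'.1, ?_⟩
    have hb2 := ih'.2
    simp only [hme, hfe]
    rw [hme] at hb2
    linear_combination hb2 - (egcd b (a % b)).2.2 * (Int.ediv_add_emod a b)

theorem inv_mod_spec (a m : Int) (hm : 2 ≤ m) (hg : Int.gcd a m = 1) :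
    ∃ x, inv_mod a m = some x ∧ 0 ≤ x ∧ x < m ∧ m ∣ (a * x - 1) := by
  have hmpos : (0:Int) < m := by omega
  have ha' : PySem.Int.mod a m = a % m := PySem.Int.mod_eq_emod_of_pos hmpos
  have hga : Int.gcd (PySem.Int.mod a m) m = 1 := by
    rw [ha', Int.gcd_emod]; exact hg
  have hmod0 : 0 ≤ PySem.Int.mod a m := PySem.Int.mod_nonneg a hmpos
  obtain ⟨hgd, hbez⟩ := egcd_spec (PySem.Int.mod a m) m hmod0 (by omega)
  rw [hga] at hgd
  refine ⟨PySem.Int.mod (egcd (PySem.Int.mod a m) m).2.1 m, ?_, ?_, ?_, ?_⟩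
  · unfold inv_mod
    simp only [if_neg (by omega : ¬ m = 1)]
    simp [hgd]
  · exact PySem.Int.mod_nonneg _ hmpos
  · exact PySem.Int.mod_lt _ hmpos
  · have hx : PySem.Int.mod (egcd (PySem.Int.mod a m) m).2.1 m
        = (egcd (PySem.Int.mod a m) m).2.1 % m := PySem.Int.mod_eq_emod_of_pos hmpos
    rw [hx]
    set x1 := (egcd (PySem.Int.mod a m) m).2.1 with hx1
    set y1 := (egcd (PySem.Int.mod a m) m).2.2 with hy1
    rw [hgd] at hbez
    rw [ha'] at hbez
    have h1 : a * (x1 % m) - 1 ≡ a * x1 - 1 [ZMOD m] := by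
      have : (x1 % m) ≡ x1 [ZMOD m] := Int.emod_emod_of_dvd x1 dvd_rfl
      exact (this.mul_left a).sub_right 1
    have h2 : a * x1 - 1 ≡ (a % m) * x1 - 1 [ZMOD m] := by
      have : a ≡ a % m [ZMOD m] := (Int.emod_emod_of_dvd a dvd_rfl).symm
      exact (this.mul_right x1).sub_right 1
    have h3 : (a % m) * x1 - 1 = m * (-y1) := by ring_nf; omega
    have h4 : m ∣ (a % m) * x1 - 1 := ⟨-y1, h3⟩
    have h6 : a * (x1 % m) - 1 ≡ (a % m) * x1 - 1 [ZMOD m] := h1.trans h2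
    have h7 : (a % m) * x1 - 1 ≡ 0 [ZMOD m] := (Int.modEq_zero_iff_dvd).2 h4
    exact (Int.modEq_zero_iff_dvd).1 (h6.trans h7)

-- ---- factorize / divisors: soundness (every produced value divides the input) ----

def prodF (f : List (Int × Int)) : Int := (f.map (fun pk => pk.1 ^ pk.2.toNat)).prod

theorem facStrip_spec (n d k : Int) (hn : 0 < n) (hd : 2 ≤ d) :
    ∃ e : ℕ, (facStrip n d k).2 = k + e ∧ (facStrip n d k).1 * d ^ e = n ∧ 0 < (facStrip n d k).1 := by
  fun_induction facStrip n d k with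
  | case1 n k h ih =>
    have hdpos : (0:Int) < d := by omega
    have hdvd : d ∣ n := (PySem.Int.mod_eq_zero_iff_dvd n d).1 h.1
    have hq : PySem.Int.floordiv n d = n / d := PySem.Int.floordiv_eq_ediv_of_pos hdpos
    have hqe : d * (n / d) = n := Int.mul_ediv_cancel' hdvd
    have hqpos : 0 < n / d := by nlinarith
    obtain ⟨e, he1, he2, he3⟩ := ih (by rw [hq]; exact hqpos)
    refine ⟨e + 1, by omega, ?_, he3⟩
    rw [hq] at he2 ⊢
    calc (facStrip (n / d) d (k+1)).1 * d ^ (e+1)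
        = ((facStrip (n / d) d (k+1)).1 * d ^ e) * d := by ring
      _ = (n / d) * d := by rw [he2]
      _ = n := by rw [mul_comm]; exact hqe
  | case2 n k h =>
    exact ⟨0, by simp, by simp, hn⟩

theorem facOuter_spec (n d : Int) (f : List (Int × Int)) (hn : 0 < n) (hd : 2 ≤ d) :
    0 < (facOuter n d f).1 ∧
    prodF (facOuter n d f).2 * (facOuter n d f).1 = prodF f * n ∧
    (∀ pk ∈ (facOuter n d f).2, pk ∈ f ∨ 1 ≤ pk.1) := by
  fun_induction facOuter n d f with
  | case1 n d f hdd next hmod s ih =>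
    obtain ⟨e, he1, he2, he3⟩ := facStrip_spec n d 0 hn hdd.2
    have hnext : (2:Int) ≤ d + if d = 2 then 1 else 2 := by split <;> omega
    obtain ⟨ih1, ih2, ih3⟩ := ih he3 hnext
    refine ⟨ih1, ?_, ?_⟩
    · rw [ih2]
      simp only [prodF, List.map_append, List.prod_append, List.map_cons, List.map_nil,
        List.prod_cons, List.prod_nil]
      have ht : ((0:Int) + (e:Int)).toNat = e := by omega
      rw [show s = facStrip n d 0 from rfl, he1, ht, mul_one]
      linear_combination (List.map (fun pk => pk.1 ^ pk.2.toNat) f).prod * he2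
    · intro pk hpk
      rcases ih3 pk hpk with hin | hge
      · rcases List.mem_append.1 hin with h1 | h1
        · exact Or.inl h1
        · simp only [List.mem_singleton] at h1
          right; rw [h1]; omega
      · exact Or.inr hge
  | case2 n d f hdd next hmod ih =>
    have hnext : (2:Int) ≤ d + if d = 2 then 1 else 2 := by split <;> omega
    exact ih hn hnext
  | case3 n d f h =>
    exact ⟨hn, by ring, fun pk hpk => Or.inl hpk⟩

theorem factorize_spec (M : Int) (hM : 0 < M) :
    prodF (factorize M) ∣ M ∧ ∀ pk ∈ factorize M, 1 ≤ pk.1 := by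
  obtain ⟨h1, h2, h3⟩ := facOuter_spec M 2 [] hM (by omega)
  simp only [prodF, List.map_nil, List.prod_nil, one_mul] at h2
  have hfe : factorize M = if (facOuter M 2 []).1 > 1
      then (facOuter M 2 []).2 ++ [((facOuter M 2 []).1, 1)] else (facOuter M 2 []).2 := rfl
  rw [hfe]
  split
  · constructor
    · refine ⟨1, ?_⟩
      simp only [prodF, List.map_append, List.prod_append, List.map_cons, List.map_nil,
        List.prod_cons, List.prod_nil]
      have ht : ((1:Int)).toNat = 1 := rfl
      rw [ht, pow_one, mul_one, mul_one]
      linarith [h2]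
    · intro pk hpk
      rcases List.mem_append.1 hpk with hin | hin
      · rcases h3 pk hin with hc | hc
        · simp at hc
        · exact hc
      · simp only [List.mem_singleton] at hin
        rw [hin]; simp; omega
  · constructor
    · exact ⟨(facOuter M 2 []).1, h2.symm⟩
    · intro pk hpk
      rcases h3 pk hpk with hc | hc
      · simp at hc
      · exact hc

theorem inner_sound (p : Int) (hp : 1 ≤ p) (divs0 : List Int) (C : Int) (K : ℕ)
    (hdivs : ∀ v ∈ divs0, 1 ≤ v ∧ v ∣ C) :
    ∀ (lst : List Int) (cur : List Int) (mul : Int),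
      (∀ v ∈ cur, 1 ≤ v ∧ v ∣ C * p ^ K) → 1 ≤ mul → mul * p ^ lst.length ∣ p ^ K →
      ∀ v ∈ (lst.foldl (fun (s : List Int × Int) _ =>
          (divs0.foldl (fun cur v => cur ++ [v * (s.2 * p)]) s.1, s.2 * p)) (cur, mul)).1,
        1 ≤ v ∧ v ∣ C * p ^ K := by
  intro lst
  induction lst with
  | nil => intro cur mul hcur _ _ v hv; exact hcur v hv
  | cons x lst ih =>
    intro cur mul hcur hmul hmulK
    simp only [List.foldl_cons]
    have hmp : (1:Int) ≤ mul * p := by nlinarith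
    have hmulpK : (mul * p) * p ^ lst.length ∣ p ^ K := by
      have : (mul * p) * p ^ lst.length = mul * p ^ (lst.length + 1) := by ring
      rw [this]
      simpa [List.length_cons] using hmulK
    apply ih
    · intro v hv
      rw [PySem.List.foldl_append_singleton_eq_map] at hv
      rcases List.mem_append.1 hv with h1 | h1
      · exact hcur v h1
      · rcases List.mem_map.1 h1 with ⟨w, hw, rfl⟩
        obtain ⟨hw1, hw2⟩ := hdivs w hw
        constructor
        · nlinarith
        · exact mul_dvd_mul hw2 (dvd_trans (dvd_mul_right _ _) hmulpK)
    · exact hmp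
    · exact hmulpK

def stepD (divs : List Int) (pk : Int × Int) : List Int :=
  divs ++ ((PySem.List.pyRange 0 pk.2 1).foldl
      (fun (s : List Int × Int) _ =>
        (divs.foldl (fun cur v => cur ++ [v * (s.2 * pk.1)]) s.1, s.2 * pk.1)) ([], 1)).1

theorem divisors_eq_foldl_stepD (fac : List (Int × Int)) :
    divisors_from_factorization fac = fac.foldl stepD [1] := rfl

theorem fold_stepD_sound : ∀ (fac : List (Int × Int)) (divs0 : List Int) (C : Int),
    (∀ pk ∈ fac, 1 ≤ pk.1) → (∀ v ∈ divs0, 1 ≤ v ∧ v ∣ C) →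
    ∀ v ∈ fac.foldl stepD divs0, 1 ≤ v ∧ v ∣ C * prodF fac := by
  intro fac
  induction fac with
  | nil => intro divs0 C _ hd v hv; simpa [prodF] using hd v hv
  | cons pk fac ih =>
    intro divs0 C hpk hd v hv
    simp only [List.foldl_cons] at hv
    set K := pk.2.toNat with hK
    have hp : 1 ≤ pk.1 := hpk pk (List.mem_cons_self)
    have hlen : (PySem.List.pyRange 0 pk.2 1).length = K := by
      rw [PySem.List.length_pyRange_one]; omega
    have hnew : ∀ w ∈ stepD divs0 pk, 1 ≤ w ∧ w ∣ C * pk.1 ^ K := by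
      intro w hw
      rcases List.mem_append.1 hw with h1 | h1
      · obtain ⟨h2, h3⟩ := hd w h1
        exact ⟨h2, dvd_mul_of_dvd_left h3 _⟩
      · refine inner_sound pk.1 hp divs0 C K hd (PySem.List.pyRange 0 pk.2 1) [] 1
          (by intro v hv; simp at hv) le_rfl (by rw [hlen]; simp) w h1
    have := ih (stepD divs0 pk) (C * pk.1 ^ K) (fun q hq => hpk q (List.mem_cons_of_mem _ hq)) hnew v hv
    refine ⟨this.1, ?_⟩
    have h4 : C * pk.1 ^ K * prodF fac = C * prodF (pk :: fac) := by
      simp only [prodF, List.map_cons, List.prod_cons, hK]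
      ring
    rw [← h4]
    exact this.2

theorem fold_stepD_mem : ∀ (fac : List (Int × Int)) (divs0 : List Int) (v : Int),
    v ∈ divs0 → v ∈ fac.foldl stepD divs0 := by
  intro fac
  induction fac with
  | nil => intro divs0 v hv; simpa using hv
  | cons pk fac ih =>
    intro divs0 v hv
    simp only [List.foldl_cons]
    exact ih _ v (List.mem_append.2 (Or.inl hv))

theorem divisors_sound (M : Int) (hM : 0 < M) :
    (∀ v ∈ divisors_from_factorization (factorize M), 1 ≤ v ∧ v ∣ M) ∧
      (1 : Int) ∈ divisors_from_factorization (factorize M) := by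
  obtain ⟨hdvd, hpk⟩ := factorize_spec M hM
  constructor
  · intro v hv
    rw [divisors_eq_foldl_stepD] at hv
    have := fold_stepD_sound (factorize M) [1] 1 hpk
      (by intro w hw; simp at hw; simp [hw]) v hv
    refine ⟨this.1, dvd_trans ?_ hdvd⟩
    simpa using this.2
  · rw [divisors_eq_foldl_stepD]
    exact fold_stepD_mem (factorize M) [1] 1 (by simp)

-- ---- A's factorization equals B's recursive one; the divisor lists have the same members ----

theorem facStrip_eq_bStrip (n d k : Int) :
    facStrip n d k = ((bStrip n d).1, k + (bStrip n d).2) := by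
  fun_induction facStrip n d k with
  | case1 n k h ih =>
    rw [bStrip, dif_pos h]
    rw [ih]
    ring_nf
  | case2 n k h =>
    rw [bStrip, dif_neg h]
    simp

theorem bStrip_snd_nonneg (n p : Int) : 0 ≤ (bStrip n p).2 := by
  fun_induction bStrip n p with
  | case1 n h s ih =>
    show 0 ≤ (bStrip (PySem.Int.floordiv n p) p).2 + 1
    omega
  | case2 n h => simp

theorem facOuter_to_bFactor : ∀ (n d : Int) (f : List (Int × Int)), 0 < n → 2 ≤ d →
    (if (facOuter n d f).1 > 1 then (facOuter n d f).2 ++ [((facOuter n d f).1, 1)]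
      else (facOuter n d f).2) = f ++ bFactor n d := by
  intro n d f hn hd
  fun_induction facOuter n d f with
  | case1 n d f hdd next hmod s ih =>
    obtain ⟨e, he1, he2, he3⟩ := facStrip_spec n d 0 hn hdd.2
    have hnext : (2:Int) ≤ d + if d = 2 then 1 else 2 := by split <;> omega
    have hrec := ih he3 hnext
    have hsb : s = bStrip n d := by
      have := facStrip_eq_bStrip n d 0
      rw [show s = facStrip n d 0 from rfl, this]
      simp
    have hs2 : s.2 ≠ 0 := by
      have hstep : facStrip n d 0 = facStrip (PySem.Int.floordiv n d) d 1 := by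
        rw [facStrip, dif_pos ⟨hmod, hdd.2, hn⟩]
        norm_num
      have h1 := facStrip_eq_bStrip (PySem.Int.floordiv n d) d 1
      have h2 := bStrip_snd_nonneg (PySem.Int.floordiv n d) d
      have hsf : s.2 = 1 + (bStrip (PySem.Int.floordiv n d) d).2 := by
        rw [show s = facStrip n d 0 from rfl, hstep, h1]
      omega
    have hbf : bFactor n d = (d, s.2) :: bFactor s.1 next := by
      rw [bFactor, dif_pos hdd]
      rw [← hsb]
      rw [if_pos hs2]
      rfl
    rw [hbf, hrec]
    simp [List.append_assoc]
  | case2 n d f hdd next hmod ih =>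
    have hnext : (2:Int) ≤ d + if d = 2 then 1 else 2 := by split <;> omega
    have hrec := ih hn hnext
    have hsb : bStrip n d = (n, 0) := by
      rw [bStrip, dif_neg]
      simp [hmod]
    have hbf : bFactor n d = bFactor n next := by
      rw [bFactor, dif_pos hdd, hsb]
      simp only [ne_eq, not_true_eq_false, if_neg]
      rfl
    rw [hbf, hrec]
  | case3 n d f h =>
    have hbf : bFactor n d = if n > 1 then [(n, 1)] else [] := by
      rw [bFactor, dif_neg h]
    rw [hbf]
    split <;> simp

theorem factorize_eq_bFactor (M : Int) (hM : 0 < M) : factorize M = bFactor M 2 := by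
  have := facOuter_to_bFactor M 2 [] hM (by omega)
  simpa [factorize] using this

theorem facOuter_snd (n d : Int) (f : List (Int × Int)) :
    ∀ pk ∈ (facOuter n d f).2, pk ∈ f ∨ 0 ≤ pk.2 := by
  fun_induction facOuter n d f with
  | case1 n d f hdd next hmod s ih =>
    intro pk hpk
    rcases ih pk hpk with hin | h
    · rcases List.mem_append.1 hin with h1 | h1
      · exact Or.inl h1
      · simp only [List.mem_singleton] at h1
        right
        rw [h1]
        have h2 : s.2 = 0 + (bStrip n d).2 := by
          rw [show s = facStrip n d 0 from rfl, facStrip_eq_bStrip]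
        have h3 := bStrip_snd_nonneg n d
        show (0:Int) ≤ s.2
        omega
    · exact Or.inr h
  | case2 n d f hdd next hmod ih =>
    intro pk hpk
    exact ih pk hpk
  | case3 n d f h =>
    intro pk hpk
    exact Or.inl hpk

theorem factorize_snd_nonneg (M : Int) : ∀ pk ∈ factorize M, 0 ≤ pk.2 := by
  intro pk hpk
  have hfe : factorize M = if (facOuter M 2 []).1 > 1
      then (facOuter M 2 []).2 ++ [((facOuter M 2 []).1, 1)] else (facOuter M 2 []).2 := rfl
  rw [hfe] at hpk
  have key : pk ∈ (facOuter M 2 []).2 → 0 ≤ pk.2 := by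
    intro hin
    rcases facOuter_snd M 2 [] pk hin with hc | hc
    · simp at hc
    · exact hc
  split at hpk
  · rcases List.mem_append.1 hpk with hin | hin
    · exact key hin
    · simp only [List.mem_singleton] at hin
      rw [hin]; omega
  · exact key hpk

-- the inner power loop of divisors_from_factorization, characterised exactly
theorem inner_char (p : Int) (D : List Int) :
    ∀ (l : List Int) (cur : List Int) (mul : Int),
      (l.foldl (fun (s : List Int × Int) _ =>
          (D.foldl (fun cur v => cur ++ [v * (s.2 * p)]) s.1, s.2 * p)) (cur, mul))
      = (cur ++ (List.range l.length).flatMap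
            (fun t => D.map (fun v => v * (mul * p ^ (t+1)))), mul * p ^ l.length) := by
  intro l
  induction l with
  | nil => intro cur mul; simp
  | cons x l ih =>
    intro cur mul
    simp only [List.foldl_cons]
    rw [PySem.List.foldl_append_singleton_eq_map]
    rw [ih]
    simp only [List.length_cons, List.range_succ_eq_map, List.flatMap_cons, List.flatMap_map]
    refine Prod.ext ?_ ?_
    · simp only [Nat.succ_eq_add_one]
      have hmap : List.map (fun v => v * (mul * p ^ (0 + 1))) D
          = List.map (fun v => v * (mul * p)) D := by
        apply List.map_congr_left
        intro v _
        ring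
      have hfm : (fun (a : ℕ) => List.map (fun v => v * (mul * p ^ (a + 1 + 1))) D)
          = (fun (t : ℕ) => List.map (fun v => v * (mul * p * p ^ (t + 1))) D) := by
        funext a
        apply List.map_congr_left
        intro v _
        ring
      rw [List.append_assoc, hmap, hfm]
    · ring

theorem mem_stepD (D : List Int) (p k x : Int) (hk : 0 ≤ k) :
    x ∈ stepD D (p, k) ↔ ∃ j : ℕ, (j : Int) ≤ k ∧ ∃ u ∈ D, x = u * p ^ j := by
  unfold stepD
  rw [inner_char]
  have hlen : (PySem.List.pyRange 0 k 1).length = k.toNat := by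
    rw [PySem.List.length_pyRange_one]; omega
  rw [hlen]
  simp only [List.nil_append, List.mem_append, List.mem_flatMap, List.mem_range, List.mem_map]
  constructor
  · rintro (hx | ⟨t, ht, u, hu, rfl⟩)
    · exact ⟨0, by omega, x, hx, by simp⟩
    · exact ⟨t + 1, by omega, u, hu, by ring⟩
  · rintro ⟨j, hj, u, hu, rfl⟩
    cases j with
    | zero => left; simpa using hu
    | succ t =>
      right
      refine ⟨t, by omega, u, hu, by ring⟩

theorem mem_bDivs_cons (p k : Int) (fac : List (Int × Int)) (x : Int) (hk : 0 ≤ k) :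
    x ∈ bDivs ((p, k) :: fac) ↔ ∃ j : ℕ, (j : Int) ≤ k ∧ ∃ w ∈ bDivs fac, x = w * p ^ j := by
  show x ∈ (PySem.List.pyRange 0 (k + 1) 1).flatMap
      (fun j => (bDivs fac).map (fun v => v * p ^ j.toNat)) ↔ _
  simp only [List.mem_flatMap, List.mem_map, PySem.List.mem_pyRange_one]
  constructor
  · rintro ⟨jI, ⟨hj0, hj1⟩, w, hw, rfl⟩
    exact ⟨jI.toNat, by omega, w, hw, rfl⟩
  · rintro ⟨j, hj, w, hw, rfl⟩
    refine ⟨(j : Int), ⟨by omega, by omega⟩, w, hw, by simp⟩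

theorem A_div_mem : ∀ (fac : List (Int × Int)) (D : List Int) (x : Int),
    (∀ pk ∈ fac, 0 ≤ pk.2) →
    (x ∈ fac.foldl stepD D ↔ ∃ v ∈ D, ∃ w ∈ bDivs fac, x = v * w) := by
  intro fac
  induction fac with
  | nil =>
    intro D x _
    simp [bDivs]
  | cons pk fac ih =>
    intro D x hk
    obtain ⟨p, k⟩ := pk
    have hk0 : (0:Int) ≤ k := hk (p, k) List.mem_cons_self
    have hkrest : ∀ pk ∈ fac, (0:Int) ≤ pk.2 := fun q hq => hk q (List.mem_cons_of_mem _ hq)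
    simp only [List.foldl_cons]
    rw [ih (stepD D (p, k)) x hkrest]
    constructor
    · rintro ⟨v, hv, w, hw, rfl⟩
      obtain ⟨j, hj, u, hu, rfl⟩ := (mem_stepD D p k v hk0).1 hv
      refine ⟨u, hu, w * p ^ j, ?_, by ring⟩
      exact (mem_bDivs_cons p k fac _ hk0).2 ⟨j, hj, w, hw, rfl⟩
    · rintro ⟨u, hu, w', hw', rfl⟩
      obtain ⟨j, hj, w, hw, rfl⟩ := (mem_bDivs_cons p k fac w' hk0).1 hw'
      refine ⟨u * p ^ j, ?_, w, hw, by ring⟩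
      exact (mem_stepD D p k _ hk0).2 ⟨j, hj, u, hu, rfl⟩

theorem mem_divs_iff (fac : List (Int × Int)) (hk : ∀ pk ∈ fac, 0 ≤ pk.2) (x : Int) :
    x ∈ divisors_from_factorization fac ↔ x ∈ bDivs fac := by
  rw [divisors_eq_foldl_stepD, A_div_mem fac [1] x hk]
  simp

-- ---- the CRT step of A computes the least solution for its divisor ----

theorem least_solution (M B m n l k : Int) (hmpos : 0 < m) (hnpos : 0 < n)
    (hMm : M / m = n) (hlpos : 0 < l) (hlM : l ≤ M) (hml : m ∣ l) (hnl : n ∣ l)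
    (huniq : ∀ e, m ∣ e → n ∣ e → l ∣ e) (hsol : n ∣ (m * k - B)) :
    (1 ≤ (if PySem.Int.mod (m * k) l = 0 then l else PySem.Int.mod (m * k) l)) ∧
    (if PySem.Int.mod (m * k) l = 0 then l else PySem.Int.mod (m * k) l) ≤ M ∧
    solD M B m (if PySem.Int.mod (m * k) l = 0 then l else PySem.Int.mod (m * k) l) ∧
    (∀ e, 1 ≤ e → solD M B m e →
      (if PySem.Int.mod (m * k) l = 0 then l else PySem.Int.mod (m * k) l) ≤ e) := by
  have hme : PySem.Int.mod (m * k) l = (m * k) % l := PySem.Int.mod_eq_emod_of_pos hlpos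
  set dd := if PySem.Int.mod (m * k) l = 0 then l else PySem.Int.mod (m * k) l with hdd
  have hmod0 : 0 ≤ (m * k) % l := Int.emod_nonneg _ (by omega)
  have hmodlt : (m * k) % l < l := Int.emod_lt_of_pos _ hlpos
  have hdd1 : 1 ≤ dd ∧ dd ≤ l := by
    rw [hdd]; split <;> omega
  have hclass : l ∣ (dd - m * k) := by
    rw [hdd]
    split
    case isTrue h =>
      have : l ∣ m * k := by
        rw [hme] at h
        exact Int.dvd_of_emod_eq_zero h
      exact dvd_sub dvd_rfl this
    case isFalse h =>
      rw [hme]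
      have : m * k % l - m * k = -(l * (m * k / l)) := by
        have := Int.emod_def (m * k) l
        omega
      rw [this]
      exact (dvd_mul_right l _).neg_right
  have hsold : solD M B m dd := by
    constructor
    · have h1 : m ∣ dd - m * k := dvd_trans hml hclass
      have h2 : m ∣ m * k := dvd_mul_right m k
      simpa using dvd_add h1 h2
    · rw [hMm]
      have h1 : n ∣ dd - m * k := dvd_trans hnl hclass
      have h2 := dvd_add h1 hsol
      simpa using h2
  refine ⟨hdd1.1, le_trans hdd1.2 hlM, hsold, ?_⟩
  rintro e he1 ⟨he2, he3⟩
  rw [hMm] at he3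
  have h1 : m ∣ e - dd := dvd_sub he2 hsold.1
  have hsold2 : n ∣ dd - B := hMm ▸ hsold.2
  have h2 : n ∣ e - dd := by
    have h := dvd_sub he3 hsold2
    have he : e - B - (dd - B) = e - dd := by ring
    rwa [he] at h
  obtain ⟨t, ht⟩ := huniq (e - dd) h1 h2
  rcases le_or_gt 0 t with h | h
  · nlinarith
  · nlinarith [hdd1.2]

theorem stepA_spec (M B m : Int) (HM : 0 < M) (hB0 : 0 ≤ B) (hBM : B < M)
    (hm : 1 ≤ m) (hmd : m ∣ M) (best : Option Int) :
    (stepA M B best m = best ∧ ∀ d, ¬ solD M B m d) ∨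
    (∃ d0, 1 ≤ d0 ∧ d0 ≤ M ∧ solD M B m d0 ∧ (∀ e, 1 ≤ e → solD M B m e → d0 ≤ e) ∧
      stepA M B best m = match best with
        | none => some d0
        | some b => if d0 < b then some d0 else some b) := by
  have hmpos : (0:Int) < m := by omega
  have hnfe : PySem.Int.floordiv M m = M / m := PySem.Int.floordiv_eq_ediv_of_pos hmpos
  set n : Int := M / m with hn
  have hmn : m * n = M := Int.mul_ediv_cancel' hmd
  have hnpos : 0 < n := by nlinarith
  set g : Int := ((Int.gcd m n : Nat) : Int) with hg
  have hgpos : 0 < g := by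
    have : Int.gcd m n ≠ 0 := by
      simp [Int.gcd_eq_zero_iff]
      omega
    positivity
  have hgm : g ∣ m := Int.gcd_dvd_left m n
  have hgn : g ∣ n := Int.gcd_dvd_right m n
  by_cases hgB : g ∣ B
  case neg =>
    left
    constructor
    · have hms : PySem.Int.mod B g ≠ 0 := by
        intro hc
        exact hgB ((PySem.Int.mod_eq_zero_iff_dvd B g).1 hc)
      simp only [stepA]
      rw [hnfe]
      rw [if_pos hms]
    · rintro d ⟨hd1, hd2⟩
      apply hgB
      have h1 : g ∣ d := dvd_trans hgm hd1
      have h2 : g ∣ d - B := dvd_trans hgn hd2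
      have h3 := dvd_sub h1 h2
      simpa using h3
  case pos =>
    right
    have hms : PySem.Int.mod B g = 0 := (PySem.Int.mod_eq_zero_iff_dvd B g).2 hgB
    have hMm : M / m = n := hn.symm
    have hgdvdM : g ∣ M := dvd_trans hgm hmd
    have hgfeM : PySem.Int.floordiv M g = M / g := PySem.Int.floordiv_eq_ediv_of_pos hgpos
    have hgfem : PySem.Int.floordiv m g = m / g := PySem.Int.floordiv_eq_ediv_of_pos hgpos
    have hgfen : PySem.Int.floordiv n g = n / g := PySem.Int.floordiv_eq_ediv_of_pos hgpos
    set l := M / g with hl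
    set m1 := m / g with hm1
    set n1 := n / g with hn1
    have hglM : g * l = M := Int.mul_ediv_cancel' hgdvdM
    have hgm1 : g * m1 = m := Int.mul_ediv_cancel' hgm
    have hgn1 : g * n1 = n := Int.mul_ediv_cancel' hgn
    have hm1pos : 0 < m1 := by nlinarith
    have hn1pos : 0 < n1 := by nlinarith
    have hlpos : 0 < l := by nlinarith
    have hlm : l = m * n1 := by
      have h2 : g * l = g * (m * n1) := by
        rw [hglM, ← hmn, ← hgn1]; ring
      exact mul_left_cancel₀ (by omega) h2
    have hln : l = n * m1 := by
      have h2 : g * l = g * (n * m1) := by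
        rw [hglM, ← hmn, ← hgm1]; ring
      exact mul_left_cancel₀ (by omega) h2
    have hlM : l ≤ M := by nlinarith
    have hml : m ∣ l := ⟨n1, hlm⟩
    have hnl : n ∣ l := ⟨m1, hln⟩
    have hbez : g = m * Int.gcdA m n + n * Int.gcdB m n := by
      rw [hg]; exact Int.gcd_eq_gcd_ab m n
    have huniq : ∀ e, m ∣ e → n ∣ e → l ∣ e := by
      rintro e ⟨a, ha⟩ ⟨b, hb⟩
      have hmn_dvd : e * g = m * n * (b * Int.gcdA m n + a * Int.gcdB m n) := by
        linear_combination e * hbez + (m * Int.gcdA m n) * hb + (n * Int.gcdB m n) * ha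
      refine ⟨b * Int.gcdA m n + a * Int.gcdB m n, ?_⟩
      have h3 : g * e = g * (l * (b * Int.gcdA m n + a * Int.gcdB m n)) := by
        calc g * e = e * g := by ring
          _ = m * n * (b * Int.gcdA m n + a * Int.gcdB m n) := hmn_dvd
          _ = M * (b * Int.gcdA m n + a * Int.gcdB m n) := by rw [hmn]
          _ = (g * l) * (b * Int.gcdA m n + a * Int.gcdB m n) := by rw [hglM]
          _ = g * (l * (b * Int.gcdA m n + a * Int.gcdB m n)) := by ring
      exact mul_left_cancel₀ (by omega) h3
    by_cases h1 : n1 = 1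
    · have hng : n = g := by rw [h1] at hgn1; omega
      have hsol : n ∣ (m * 0 - B) := by
        rw [hng]
        simpa using hgB.neg_right
      obtain ⟨c1, c2, c3, c4⟩ := least_solution M B m n l 0 hmpos hnpos hMm hlpos hlM hml hnl huniq hsol
      refine ⟨_, c1, c2, c3, c4, ?_⟩
      simp only [stepA]
      rw [hnfe]
      rw [if_neg (not_not_intro hms)]
      rw [hgfeM, hgfem, hgfen]
      rw [if_pos h1]
      cases best <;> rfl
    · have h2 : 2 ≤ n1 := by omega
      have hgcdnat : 0 < Int.gcd m n := by
        have : (0:Int) < ((Int.gcd m n : Nat) : Int) := hg ▸ hgpos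
        exact_mod_cast this
      have hcop : Int.gcd m1 n1 = 1 := by
        simpa [← hg, ← hm1, ← hn1] using Int.gcd_div_gcd_div_gcd (i := m) (j := n) hgcdnat
      obtain ⟨x, hxeq, hx0, hxlt, hxdvd⟩ := inv_mod_spec m1 n1 h2 hcop
      have hn1posI : (0:Int) < n1 := hn1pos
      have hcfe : PySem.Int.floordiv B g = B / g := PySem.Int.floordiv_eq_ediv_of_pos hgpos
      have hgc : g * (B / g) = B := Int.mul_ediv_cancel' hgB
      set k := PySem.Int.mod (x * PySem.Int.mod (PySem.Int.floordiv B g) n1) n1 with hk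
      have hsol : n ∣ (m * k - B) := by
        have hme1 : PySem.Int.mod (PySem.Int.floordiv B g) n1 = (B / g) % n1 := by
          rw [hcfe]; exact PySem.Int.mod_eq_emod_of_pos hn1posI
        have hme2 : k = (x * ((B / g) % n1)) % n1 := by
          rw [hk, hme1]; exact PySem.Int.mod_eq_emod_of_pos hn1posI
        have e1 : k ≡ x * (B / g) [ZMOD n1] := by
          calc k ≡ x * ((B / g) % n1) [ZMOD n1] := by rw [hme2]; exact Int.emod_emod_of_dvd _ dvd_rfl
            _ ≡ x * (B / g) [ZMOD n1] := Int.ModEq.mul_left x (Int.emod_emod_of_dvd _ dvd_rfl)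
        have e2 : m1 * k ≡ m1 * (x * (B / g)) [ZMOD n1] := e1.mul_left m1
        have e3 : m1 * (x * (B / g)) ≡ B / g [ZMOD n1] := by
          have hd : n1 ∣ (m1 * (x * (B / g)) - B / g) := by
            have := hxdvd.mul_left (B / g)
            have heq : B / g * (m1 * x - 1) = m1 * (x * (B / g)) - B / g := by ring
            rwa [heq] at this
          exact (Int.modEq_iff_dvd.2 (by simpa using hd.neg_right)).symm.symm
        have e4 : m1 * k ≡ B / g [ZMOD n1] := e2.trans e3
        have hd2 : n1 ∣ (m1 * k - B / g) := by
          have := Int.ModEq.dvd e4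
          simpa using this.neg_right
        obtain ⟨t, ht⟩ := hd2
        refine ⟨t, ?_⟩
        calc m * k - B = g * (m1 * k - B / g) := by
              linear_combination (-k) * hgm1 + hgc
          _ = g * (n1 * t) := by rw [ht]
          _ = n * t := by rw [← hgn1]; ring
      obtain ⟨c1, c2, c3, c4⟩ := least_solution M B m n l k hmpos hnpos hMm hlpos hlM hml hnl huniq hsol
      refine ⟨_, c1, c2, c3, c4, ?_⟩
      simp only [stepA]
      rw [hnfe]
      rw [if_neg (not_not_intro hms)]
      rw [hgfeM, hgfem, hgfen]
      rw [if_neg h1, hxeq]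
      cases best <;> rfl

def GoodAcc (M B : Int) (proc : List Int) (acc : Option Int) : Prop :=
  (acc = none ∧ ∀ m ∈ proc, ∀ d, ¬ solD M B m d) ∨
  (∃ v, acc = some v ∧ 1 ≤ v ∧ v ≤ M ∧ (∃ m ∈ proc, solD M B m v) ∧
    ∀ m ∈ proc, ∀ d, 1 ≤ d → solD M B m d → v ≤ d)

theorem fold_stepA (M B : Int) (HM : 0 < M) (hB0 : 0 ≤ B) (hBM : B < M) :
    ∀ (ms proc : List Int) (acc : Option Int),
      (∀ m ∈ ms, 1 ≤ m ∧ m ∣ M) → GoodAcc M B proc acc →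
      GoodAcc M B (proc ++ ms) (ms.foldl (stepA M B) acc) := by
  intro ms
  induction ms with
  | nil => intro proc acc _ hga; simpa using hga
  | cons m ms ih =>
    intro proc acc hms hga
    obtain ⟨hm1, hm2⟩ := hms m List.mem_cons_self
    have hstep := stepA_spec M B m HM hB0 hBM hm1 hm2 acc
    have hnext : GoodAcc M B (proc ++ [m]) (stepA M B acc m) := by
      rcases hstep with ⟨heq, hnone⟩ | ⟨d0, hd1, hd2, hd3, hd4, heq⟩
      · rw [heq]
        rcases hga with ⟨hacc, hall⟩ | ⟨v, hacc, hv1, hv2, hv3, hv4⟩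
        · left
          refine ⟨hacc, ?_⟩
          intro q hq d
          rcases List.mem_append.1 hq with h | h
          · exact hall q h d
          · simp only [List.mem_singleton] at h; subst h; exact hnone d
        · right
          refine ⟨v, hacc, hv1, hv2, ?_, ?_⟩
          · obtain ⟨w, hw1, hw2⟩ := hv3
            exact ⟨w, List.mem_append.2 (Or.inl hw1), hw2⟩
          · intro q hq d hd hsold
            rcases List.mem_append.1 hq with h | h
            · exact hv4 q h d hd hsold
            · simp only [List.mem_singleton] at h; subst h
              exact absurd hsold (hnone d)
      · rcases hga with ⟨hacc, hall⟩ | ⟨v, hacc, hv1, hv2, hv3, hv4⟩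
        · subst hacc
          rw [heq]
          right
          refine ⟨d0, rfl, hd1, hd2, ⟨m, List.mem_append.2 (Or.inr (by simp)), hd3⟩, ?_⟩
          intro q hq d hd hsold
          rcases List.mem_append.1 hq with h | h
          · exact absurd hsold (hall q h d)
          · simp only [List.mem_singleton] at h; subst h
            exact hd4 d hd hsold
        · subst hacc
          rw [heq]
          show GoodAcc M B (proc ++ [m]) (if d0 < v then some d0 else some v)
          by_cases hlt : d0 < v
          · rw [if_pos hlt]
            right
            refine ⟨d0, rfl, hd1, hd2, ⟨m, List.mem_append.2 (Or.inr (by simp)), hd3⟩, ?_⟩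
            intro q hq d hd hsold
            rcases List.mem_append.1 hq with h | h
            · exact le_trans (le_of_lt hlt) (hv4 q h d hd hsold)
            · simp only [List.mem_singleton] at h; subst h
              exact hd4 d hd hsold
          · rw [if_neg hlt]
            right
            obtain ⟨w, hw1, hw2⟩ := hv3
            refine ⟨v, rfl, hv1, hv2, ⟨w, List.mem_append.2 (Or.inl hw1), hw2⟩, ?_⟩
            intro q hq d hd hsold
            rcases List.mem_append.1 hq with h | h
            · exact hv4 q h d hd hsold
            · simp only [List.mem_singleton] at h; subst h
              exact le_trans (by omega) (hd4 d hd hsold)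
    have := ih (proc ++ [m]) (stepA M B acc m)
      (fun q hq => hms q (List.mem_cons_of_mem _ hq)) hnext
    simpa [List.append_assoc] using this

theorem minimal_d_isAns (M : Int) (divs : List Int) (B : Int) (HM : 0 < M)
    (hB1 : 1 ≤ B) (hBM : B < M) (hsound : ∀ m ∈ divs, 1 ≤ m ∧ m ∣ M)
    (h1 : (1 : Int) ∈ divs) : IsAns M divs B (minimal_d_from_B M divs B) := by
  have hga := fold_stepA M B HM (by omega) hBM divs [] none hsound (Or.inl ⟨rfl, by simp⟩)
  simp only [List.nil_append] at hga
  have hsol1 : solD M B 1 B := by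
    refine ⟨one_dvd B, ?_⟩
    simp
  rcases hga with ⟨hacc, hall⟩ | ⟨v, hacc, hv1, hv2, hv3, hv4⟩
  · exact absurd hsol1 (hall 1 h1 B)
  · unfold minimal_d_from_B
    rw [hacc]
    exact ⟨hv1, hv2, hv3, fun d hd ⟨q, hq1, hq2⟩ => hv4 q hq1 d hd hq2⟩

-- ---- A's cache loop is a map of minimal_d_from_B over the residues ----

theorem loopA_inv (M : Int) (divs : List Int) (j : ℕ) (hj : (j : Int) ≤ M) (hM : 0 < M) :
    let st := (PySem.List.pyRange 0 (j : Int) 1).foldl (loopA M divs)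
      (List.replicate M.toNat (-1), List.replicate M.toNat 0)
    st.1.length = M.toNat ∧
    (∀ i : ℕ, i < M.toNat →
      PySem.List.pyGetD st.1 (i : Int) 0 = -1 ∨
      PySem.List.pyGetD st.1 (i : Int) 0 = minimal_d_from_B M divs (i : Int)) ∧
    st.2 = (List.range j).map
        (fun (r : ℕ) => minimal_d_from_B M divs (PySem.Int.mod (2 * ((r : ℕ) : Int) + 1) M)) ++
      List.replicate (M.toNat - j) 0 := by
  induction j with
  | zero =>
    rw [show ((0:ℕ):Int) = 0 by rfl, PySem.List.pyRange_one_eq_nil (le_refl (0:Int))]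
    refine ⟨by simp, ?_, by simp⟩
    intro i hi
    left
    rw [PySem.List.pyGetD_natCast]
    simp [List.getD_eq_getElem?_getD, List.getElem?_replicate, hi]
  | succ j ihj =>
    have hj' : (j : Int) ≤ M := by push_cast at hj ⊢; omega
    obtain ⟨ih1, ih2, ih3⟩ := ihj hj'
    have hcast : ((j+1 : ℕ) : Int) = (j : Int) + 1 := by push_cast; ring
    have hsplit : PySem.List.pyRange 0 ((j+1 : ℕ) : Int) 1
        = PySem.List.pyRange 0 (j : Int) 1 ++ [(j : Int)] := by
      rw [hcast]; exact PySem.List.pyRange_one_succ_right (by positivity)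
    intro st
    rw [show st = (PySem.List.pyRange 0 ((j+1:ℕ) : Int) 1).foldl (loopA M divs)
      (List.replicate M.toNat (-1), List.replicate M.toNat 0) from rfl, hsplit, List.foldl_append]
    set stj := (PySem.List.pyRange 0 (j : Int) 1).foldl (loopA M divs)
      (List.replicate M.toNat (-1), List.replicate M.toNat 0) with hstj
    simp only [List.foldl_cons, List.foldl_nil]
    have hjM : j < M.toNat := by omega
    set Bm := PySem.Int.mod (2 * (j:Int) + 1) M with hBm
    have hB0 : 0 ≤ Bm := PySem.Int.mod_nonneg _ hM
    have hBlt : Bm < M := PySem.Int.mod_lt _ hM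
    set i0 := Bm.toNat with hi0
    have hBi : Bm = (i0 : Int) := by omega
    have hi0M : i0 < M.toNat := by omega
    have hi0len : i0 < stj.1.length := by rw [ih1]; exact hi0M
    set f := minimal_d_from_B M divs with hf
    have key : ∀ cache : List Int,
        (cache = if PySem.List.pyGetD stj.1 Bm 0 = -1
          then PySem.List.pySetD stj.1 Bm (f Bm) else stj.1) →
        cache.length = M.toNat ∧
        (∀ i : ℕ, i < M.toNat →
          PySem.List.pyGetD cache (i : Int) 0 = -1 ∨
          PySem.List.pyGetD cache (i : Int) 0 = f (i : Int)) ∧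
        PySem.List.pyGetD cache Bm 0 = f Bm := by
      intro cache hcache
      rw [hBi] at hcache ⊢
      by_cases hc : PySem.List.pyGetD stj.1 ((i0 : ℕ) : Int) 0 = -1
      · rw [if_pos hc] at hcache
        subst hcache
        refine ⟨by rw [PySem.List.length_pySetD]; exact ih1, ?_, ?_⟩
        · intro i hi
          rw [PySem.List.pyGetD_pySetD_natCast stj.1 i0 i (f (i0 : Int)) 0 hi0len]
          split
          · next h => right; rw [h]
          · next h => exact ih2 i hi
        · rw [PySem.List.pyGetD_pySetD_natCast stj.1 i0 i0 (f (i0 : Int)) 0 hi0len]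
          simp
      · rw [if_neg hc] at hcache
        subst hcache
        refine ⟨ih1, ih2, ?_⟩
        rcases ih2 i0 hi0M with h | h
        · exact absurd h hc
        · exact h
    obtain ⟨hc1, hc2, hc3⟩ := key _ rfl
    refine ⟨hc1, hc2, ?_⟩
    show PySem.List.pySetD stj.2 (j:Int) _ = _
    rw [PySem.List.pySetD_natCast, hc3, ih3]
    have hlen : ((List.range j).map
        (fun (r : ℕ) => f (PySem.Int.mod (2 * ((r : ℕ) : Int) + 1) M))).length = j := by simp
    have hrep : List.replicate (M.toNat - j) (0:Int)
        = 0 :: List.replicate (M.toNat - (j+1)) 0 := by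
      rw [← List.replicate_succ]
      congr 1
      omega
    rw [hrep]
    have hset : ∀ (pre suf : List Int) (v : Int), pre.length = j →
        (pre ++ 0 :: suf).set j v = pre ++ v :: suf := by
      intro pre suf v hpre
      rw [← hpre]
      simp
    rw [hset _ _ _ hlen]
    rw [List.range_succ, List.map_append]
    simp [hBm]

-- ---- B's sieve: flattening to an event list and the relaxation invariant ----

def eventsOf (M : Int) (divs : List Int) : List (Int × Int) :=
  divs.flatMap (fun m =>
    (PySem.List.pyRange m (M + 1) m).flatMap (fun d =>
      (PySem.List.pyRange (PySem.Int.mod d (PySem.Int.floordiv M m)) M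
        (PySem.Int.floordiv M m)).map (fun B => (B, d))))

theorem sieve_eq_events (M : Int) (divs : List Int) (T : List Int) :
    divs.foldl (sieveDiv M) T = (eventsOf M divs).foldl (fun T bd => relaxB bd.2 T bd.1) T := by
  unfold eventsOf
  rw [List.foldl_flatMap]
  apply PySem.List.foldl_congr_mem
  intro T' m hmem
  rw [List.foldl_flatMap]
  simp only [sieveDiv]
  apply PySem.List.foldl_congr_mem
  intro T'' d hdm
  rw [List.foldl_map]

theorem mem_eventsOf (M : Int) (divs : List Int) (HM : 0 < M)
    (hsound : ∀ m ∈ divs, 1 ≤ m ∧ m ∣ M) (B d : Int) :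
    (B, d) ∈ eventsOf M divs ↔
      0 ≤ B ∧ B < M ∧ 1 ≤ d ∧ d ≤ M ∧ ∃ m ∈ divs, solD M B m d := by
  unfold eventsOf
  simp only [List.mem_flatMap, List.mem_map, Prod.mk.injEq]
  constructor
  · rintro ⟨m, hm, dd, hdd, B', hB', hBeq, hdeq⟩
    subst hBeq
    subst hdeq
    obtain ⟨hm1, hm2⟩ := hsound m hm
    have hmpos : (0:Int) < m := by omega
    have hnfe : PySem.Int.floordiv M m = M / m := PySem.Int.floordiv_eq_ediv_of_pos hmpos
    set n := M / m with hn
    have hmn : m * n = M := Int.mul_ediv_cancel' hm2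
    have hnpos : 0 < n := by nlinarith
    rw [PySem.List.mem_pyRange_iff_of_pos hmpos] at hdd
    rw [hnfe] at hB'
    rw [PySem.List.mem_pyRange_iff_of_pos hnpos] at hB'
    obtain ⟨hd1, hd2, hd3⟩ := hdd
    obtain ⟨hB1, hB2, hB3⟩ := hB'
    have hmodd : PySem.Int.mod dd n = dd % n := PySem.Int.mod_eq_emod_of_pos hnpos
    rw [hmodd] at hB1 hB3
    have hmod0 : 0 ≤ dd % n := Int.emod_nonneg _ (by omega)
    have hemod : dd % n = dd - n * (dd / n) := Int.emod_def dd n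
    refine ⟨by omega, hB2, by omega, by omega, m, hm, ?_, ?_⟩
    · have : m ∣ dd - m := hd3
      have h2 : m ∣ (dd - m) + m := dvd_add this dvd_rfl
      simpa using h2
    · obtain ⟨t, ht⟩ := hB3
      exact ⟨dd / n - t, by linear_combination -hemod - ht⟩
  · rintro ⟨hB0, hBM, hd1, hdM, m, hm, hsol1, hsol2⟩
    obtain ⟨hm1, hm2⟩ := hsound m hm
    have hmpos : (0:Int) < m := by omega
    have hnfe : PySem.Int.floordiv M m = M / m := PySem.Int.floordiv_eq_ediv_of_pos hmpos
    set n := M / m with hn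
    have hmn : m * n = M := Int.mul_ediv_cancel' hm2
    have hnpos : 0 < n := by nlinarith
    refine ⟨m, hm, d, ?_, ⟨B, ?_, rfl, rfl⟩⟩
    · rw [PySem.List.mem_pyRange_iff_of_pos hmpos]
      refine ⟨Int.le_of_dvd (by omega) hsol1, by omega, ?_⟩
      obtain ⟨t, ht⟩ := hsol1
      exact ⟨t - 1, by linear_combination ht⟩
    · rw [hnfe, PySem.List.mem_pyRange_iff_of_pos hnpos]
      have hmodd : PySem.Int.mod d n = d % n := PySem.Int.mod_eq_emod_of_pos hnpos
      have hmod0 : 0 ≤ d % n := Int.emod_nonneg _ (by omega)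
      have hmodlt : d % n < n := Int.emod_lt_of_pos _ hnpos
      have hemod : d % n = d - n * (d / n) := Int.emod_def d n
      obtain ⟨t, ht⟩ := hsol2
      rw [hmodd]
      refine ⟨?_, hBM, ?_⟩
      · rcases le_or_gt (d % n) B with h | h
        · exact h
        · exfalso
          have : B - d % n = n * (d / n - t) := by linear_combination -ht - hemod
          rcases le_or_gt 0 (d / n - t) with h2 | h2 <;> nlinarith
      · exact ⟨d / n - t, by linear_combination -ht - hemod⟩

def entOK (M : Int) (P : List (Int × Int)) (T : List Int) : Prop :=
  T.length = M.toNat ∧ ∀ i : ℕ, i < M.toNat →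
    (PySem.List.pyGetD T (i : Int) 0 = 0 ∧ ∀ d, ((i : Int), d) ∉ P) ∨
    (((i : Int), PySem.List.pyGetD T (i : Int) 0) ∈ P ∧ 1 ≤ PySem.List.pyGetD T (i : Int) 0 ∧
      ∀ d, ((i : Int), d) ∈ P → PySem.List.pyGetD T (i : Int) 0 ≤ d)

theorem relax_step (M : Int) (P : List (Int × Int)) (T : List Int) (B d : Int)
    (hB0 : 0 ≤ B) (hBM : B < M) (hd1 : 1 ≤ d) (hok : entOK M P T) :
    entOK M (P ++ [(B, d)]) (relaxB d T B) := by
  obtain ⟨hlen, hent⟩ := hok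
  set i0 := B.toNat with hi0
  have hBi : B = (i0 : Int) := by omega
  have hi0M : i0 < M.toNat := by omega
  have hi0len : i0 < T.length := by omega
  constructor
  · unfold relaxB
    split
    · rw [PySem.List.length_pySetD]; exact hlen
    · exact hlen
  · intro i hi
    unfold relaxB
    rw [hBi]
    by_cases hcond : PySem.List.pyGetD T ((i0:ℕ) : Int) 0 = 0 ∨ d < PySem.List.pyGetD T ((i0:ℕ) : Int) 0
    · rw [if_pos hcond]
      rw [PySem.List.pyGetD_pySetD_natCast T i0 i d 0 hi0len]
      by_cases hii : i = i0
      · rw [if_pos hii]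
        right
        subst hii
        refine ⟨List.mem_append.2 (Or.inr (by simp)), hd1, ?_⟩
        intro d' hd'
        rcases List.mem_append.1 hd' with h | h
        · rcases hent i0 hi with ⟨hz, hno⟩ | ⟨hmem, h1, hmin⟩
          · exact absurd h (hno d')
          · rcases hcond with hc | hc
            · rw [hc] at h1; omega
            · exact le_trans (le_of_lt hc) (hmin d' h)
        · simp only [List.mem_singleton, Prod.mk.injEq] at h
          omega
      · rw [if_neg hii]
        have hne : ∀ d', ((i : Int), d') ∈ P ++ [((i0 : Int), d)] ↔ ((i : Int), d') ∈ P := by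
          intro d'
          constructor
          · intro h
            rcases List.mem_append.1 h with h | h
            · exact h
            · simp only [List.mem_singleton, Prod.mk.injEq] at h
              exact absurd (by omega : i = i0) hii
          · intro h; exact List.mem_append.2 (Or.inl h)
        rcases hent i hi with ⟨hz, hno⟩ | ⟨hmem, h1, hmin⟩
        · left; exact ⟨hz, fun d' h => (hno d') ((hne d').1 h)⟩
        · right; exact ⟨(hne _).2 hmem, h1, fun d' h => hmin d' ((hne d').1 h)⟩
    · rw [if_neg hcond]
      push_neg at hcond
      obtain ⟨hnz, hge⟩ := hcond
      by_cases hii : i = i0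
      · subst hii
        rcases hent i0 hi with ⟨hz, hno⟩ | ⟨hmem, h1, hmin⟩
        · exact absurd hz hnz
        · right
          refine ⟨List.mem_append.2 (Or.inl hmem), h1, ?_⟩
          intro d' hd'
          rcases List.mem_append.1 hd' with h | h
          · exact hmin d' h
          · simp only [List.mem_singleton, Prod.mk.injEq] at h
            omega
      · have hne : ∀ d', ((i : Int), d') ∈ P ++ [((i0 : Int), d)] ↔ ((i : Int), d') ∈ P := by
          intro d'
          constructor
          · intro h
            rcases List.mem_append.1 h with h | h
            · exact h
            · simp only [List.mem_singleton, Prod.mk.injEq] at h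
              exact absurd (by omega : i = i0) hii
          · intro h; exact List.mem_append.2 (Or.inl h)
        rcases hent i hi with ⟨hz, hno⟩ | ⟨hmem, h1, hmin⟩
        · left; exact ⟨hz, fun d' h => (hno d') ((hne d').1 h)⟩
        · right; exact ⟨(hne _).2 hmem, h1, fun d' h => hmin d' ((hne d').1 h)⟩

theorem relax_fold (M : Int) : ∀ (E P : List (Int × Int)) (T : List Int),
    (∀ bd ∈ E, 0 ≤ bd.1 ∧ bd.1 < M ∧ 1 ≤ bd.2) → entOK M P T →
    entOK M (P ++ E) (E.foldl (fun T bd => relaxB bd.2 T bd.1) T) := by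
  intro E
  induction E with
  | nil => intro P T _ hok; simpa using hok
  | cons bd E ih =>
    intro P T hbd hok
    obtain ⟨h1, h2, h3⟩ := hbd bd List.mem_cons_self
    have hstep := relax_step M P T bd.1 bd.2 h1 h2 h3 hok
    have := ih (P ++ [(bd.1, bd.2)]) (relaxB bd.2 T bd.1)
      (fun q hq => hbd q (List.mem_cons_of_mem _ hq)) hstep
    simpa [List.append_assoc] using this

theorem B_entry (M : Int) (divs : List Int) (HM : 0 < M)
    (hsound : ∀ m ∈ divs, 1 ≤ m ∧ m ∣ M) (h1 : (1 : Int) ∈ divs)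
    (B : Int) (hB1 : 1 ≤ B) (hBM : B < M) :
    IsAns M divs B
      (PySem.List.pyGetD (divs.foldl (sieveDiv M) (PySem.List.pyRepeat [0] M)) B 0) := by
  rw [sieve_eq_events, PySem.List.pyRepeat_singleton]
  have hinit : entOK M [] (List.replicate M.toNat 0) := by
    refine ⟨by simp, ?_⟩
    intro i hi
    left
    refine ⟨?_, by simp⟩
    rw [PySem.List.pyGetD_natCast]
    simp [List.getD_eq_getElem?_getD, List.getElem?_replicate, hi]
  have hbounds : ∀ bd ∈ eventsOf M divs, 0 ≤ bd.1 ∧ bd.1 < M ∧ 1 ≤ bd.2 := by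
    intro bd hbd
    have := (mem_eventsOf M divs HM hsound bd.1 bd.2).1 (by simpa using hbd)
    exact ⟨this.1, this.2.1, this.2.2.1⟩
  have hfin := relax_fold M (eventsOf M divs) [] (List.replicate M.toNat 0) hbounds hinit
  simp only [List.nil_append] at hfin
  obtain ⟨hlen, hent⟩ := hfin
  set T := (eventsOf M divs).foldl (fun T bd => relaxB bd.2 T bd.1) (List.replicate M.toNat 0) with hT
  set i0 := B.toNat with hi0
  have hBi : B = ((i0 : ℕ) : Int) := by omega
  have hi0M : i0 < M.toNat := by omega
  rw [hBi]
  have hev : ((i0 : Int), (i0 : Int)) ∈ eventsOf M divs := by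
    refine (mem_eventsOf M divs HM hsound _ _).2
      ⟨by omega, by omega, by omega, by omega, 1, h1, one_dvd _, by simp⟩
  rcases hent i0 hi0M with ⟨hz, hno⟩ | ⟨hmem, hpos, hmin⟩
  · exact absurd hev (hno _)
  · have hprops := (mem_eventsOf M divs HM hsound _ _).1 hmem
    refine ⟨hpos, hprops.2.2.2.1, hprops.2.2.2.2, ?_⟩
    intro dd hdd1 hddsol
    rcases le_or_gt dd M with hddM | hddM
    · exact hmin dd ((mem_eventsOf M divs HM hsound _ _).2
        ⟨by omega, by omega, hdd1, hddM, hddsol⟩)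
    · have := hprops.2.2.2.1
      omega

-- any residue (2r+1) % M is odd (hence ≥ 1) when M = 2N is even and positive
theorem residue_pos (N r : Int) (hM : 0 < 2 * N) : 1 ≤ PySem.Int.mod (2 * r + 1) (2 * N) := by
  have h0 : 0 ≤ PySem.Int.mod (2 * r + 1) (2 * N) := PySem.Int.mod_nonneg _ hM
  have he : PySem.Int.mod (2 * r + 1) (2 * N) = (2 * r + 1) % (2 * N) :=
    PySem.Int.mod_eq_emod_of_pos hM
  have hd : (2 * r + 1) % (2 * N) = 2 * r + 1 - 2 * N * ((2 * r + 1) / (2 * N)) :=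
    Int.emod_def _ _
  have ht : 2 * N * ((2 * r + 1) / (2 * N)) = 2 * (N * ((2 * r + 1) / (2 * N))) := by ring
  rw [he, hd, ht]
  rw [he, hd, ht] at h0
  omega

-- ===== VERDICT (by name: the statement is the Claim_ definition above) =====
theorem build_min_d_table_spec : Claim_equal_build_min_d_table := by
  intro N _
  unfold Spec_build_min_d_table
  by_cases hN : N ≤ 0
  · have h0 : (2 * N).toNat = 0 := by omega
    have hnil : PySem.List.pyRange 0 (2 * N) 1 = [] :=
      PySem.List.pyRange_one_eq_nil (by omega)
    simp [build_min_d_table, build_min_d_table_alt, hnil, PySem.List.pyRepeat_singleton, h0]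
  · have hM : (0:Int) < 2 * N := by omega
    obtain ⟨hsound, h1⟩ := divisors_sound (2 * N) hM
    have hMt : (((2 * N).toNat : ℕ) : Int) = 2 * N := Int.toNat_of_nonneg (by omega)
    set divsA := divisors_from_factorization (factorize (2 * N)) with hdivsA
    set divsB := bDivs (bFactor (2 * N) 2) with hdivsB
    -- the two divisor lists have the same members
    have hmemf : ∀ x, x ∈ divsA ↔ x ∈ divsB := by
      intro x
      rw [hdivsA, hdivsB, ← factorize_eq_bFactor (2 * N) hM]
      exact mem_divs_iff (factorize (2 * N)) (factorize_snd_nonneg (2 * N)) x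
    have hsoundB : ∀ m ∈ divsB, 1 ≤ m ∧ m ∣ 2 * N := fun m hm => hsound m ((hmemf m).2 hm)
    have h1B : (1 : Int) ∈ divsB := (hmemf 1).1 h1
    have hAeq : build_min_d_table N = (2 * N,
      ((PySem.List.pyRange 0 (2 * N) 1).foldl (loopA (2 * N) divsA)
        (PySem.List.pyRepeat [-1] (2 * N), PySem.List.pyRepeat [0] (2 * N))).2) := rfl
    have hBeq : build_min_d_table_alt N = (2 * N,
      (PySem.List.pyRange 0 (2 * N) 1).map (fun r => PySem.List.pyGetD
        (divsB.foldl (sieveDiv (2 * N)) (PySem.List.pyRepeat [0] (2 * N)))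
        (PySem.Int.mod (2 * r + 1) (2 * N)) 0)) := rfl
    rw [hAeq, hBeq]
    have hA := loopA_inv (2 * N) divsA (2 * N).toNat (by omega) hM
    rw [hMt] at hA
    obtain ⟨_, _, hA2⟩ := hA
    simp only [PySem.List.pyRepeat_singleton]
    rw [hA2]
    simp only [Nat.sub_self, List.replicate_zero, List.append_nil]
    refine Prod.ext rfl ?_
    show (List.range (2 * N).toNat).map
        (fun (r : ℕ) => minimal_d_from_B (2 * N) divsA (PySem.Int.mod (2 * ((r : ℕ) : Int) + 1) (2 * N)))
      = (PySem.List.pyRange 0 (2 * N) 1).map _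
    rw [PySem.List.pyRange_one 0 (2 * N)]
    rw [List.map_map]
    have hsub : ((2 : Int) * N - 0).toNat = (2 * N).toNat := by omega
    rw [hsub]
    apply List.map_congr_left
    intro r hr
    simp only [Function.comp_apply, zero_add]
    set B0 := PySem.Int.mod (2 * (r : Int) + 1) (2 * N) with hB0
    have hB1 : 1 ≤ B0 := residue_pos N r hM
    have hBM : B0 < 2 * N := PySem.Int.mod_lt _ hM
    have hAv := minimal_d_isAns (2 * N) divsA B0 hM hB1 hBM hsound h1
    have hBv := B_entry (2 * N) divsB hM hsoundB h1B B0 hB1 hBM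
    rw [PySem.List.pyRepeat_singleton] at hBv
    exact IsAns_unique (IsAns_congr hmemf hAv) hBv
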